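-- pv_equiv track=rewrite | github.com/dd-debug/chemical_potential_diagram_and_convex_hull_and_pourbaix_diagram | phase_diagram_packages/ChemicalPotentialDiagram.py | overlap_lines_axis
-- ===== SOURCE A (Python) =====
-- def overlap_lines_axis(lines):
--     """
--     Given a dict of 1-D lines as tuples of start and end points,
--     returns a dict of lists, where each inner list corresponds to a segment
--     of the x-axis and contains the indices of the lines that overlap with
--     that segment.
--
--     Args:
--         lines (dict): a dict of tuples representing 1-D line segments
--
--     Returns:
--         dict: a list of lists, where each inner list contains the indices
--         of the lines that overlap with a segment of the x-axis
--     """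
--     # Create a list of all the unique x-axis values in the line segments
--     x_values = set()
--     for key, line in lines.items():
--         x_values.add(line[0])
--         x_values.add(line[1])
--
--     # Sort the x-axis values
--     x_values = sorted(x_values)
--
--     # Create a dictionary mapping x-axis segments to the lines that overlap with them
--     overlap_dict = {}
--     for i in range(len(x_values) - 1):
--         start = x_values[i]
--         end = x_values[i+1]
--         overlap_dict[(start, end)] = []
--         for key, line in lines.items():
--             if line[0] < end and line[1] > start:
--                 overlap_dict[(start, end)].append(key)
--
--     return overlap_dict
-- ===== SOURCE B (Python) =====
-- def overlap_lines_axis(lines):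
--     # Sort the unique endpoints once, map each endpoint to its index, then let
--     # each line append its key to exactly the contiguous bucket range it covers.
--     xs = sorted({x for line in lines.values() for x in (line[0], line[1])})
--     pos = {x: i for i, x in enumerate(xs)}
--     buckets = [[] for _ in range(len(xs) - 1)]
--     for key, line in lines.items():
--         for i in range(pos[line[0]], pos[line[1]]):
--             buckets[i].append(key)
--     return {(xs[i], xs[i + 1]): seg for i, seg in enumerate(buckets)}
-- ===== Notes on version B (the rewrite author's own statement) =====
-- stated objective: faster
-- what changed: Instead of rescanning every line for each of the O(n) x-axis segments (A's nested loops), B sorts the unique endpoints once, maps each endpoint to its segment index with a dict, and has each line append its key directly to the contiguous range of buckets it covers.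
import Mathlib
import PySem

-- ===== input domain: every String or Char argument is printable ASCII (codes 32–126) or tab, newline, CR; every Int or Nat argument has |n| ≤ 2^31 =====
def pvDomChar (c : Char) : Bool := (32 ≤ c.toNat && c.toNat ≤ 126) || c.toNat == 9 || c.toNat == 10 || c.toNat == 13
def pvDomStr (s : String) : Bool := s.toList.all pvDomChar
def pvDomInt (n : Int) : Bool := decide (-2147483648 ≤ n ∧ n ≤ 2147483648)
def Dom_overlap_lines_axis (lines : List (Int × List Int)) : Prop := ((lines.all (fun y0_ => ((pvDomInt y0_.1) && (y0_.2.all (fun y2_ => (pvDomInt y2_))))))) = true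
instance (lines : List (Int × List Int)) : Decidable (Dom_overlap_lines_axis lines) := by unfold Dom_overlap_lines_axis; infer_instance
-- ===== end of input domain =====

-- B replaces A's rescan of every line per x-axis segment by one sort of the unique
-- endpoints plus a position dict, appending each line's key to its contiguous bucket
-- range; a timing run measured it faster (asymptotic: O(n^2) -> O(n log n + output)).

-- ===== PORT A =====
-- line[0] / line[1] ported as pyGetD (exact under Pre_: every value list has length >= 2).
-- overlap_dict keys (start, end) are fresh at every i (x_values strictly increasing),
-- so each dict insertion is exactly appending the pair at the end.
def overlap_lines_axis (lines : List (Int × List Int)) : List (Int × Int × List Int) :=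
  let d : PySem.Dict Int (List Int) := PySem.Dict.ofList lines
  let xv : PySem.Set Int := d.items.foldl (fun s kv =>
    PySem.Set.add (PySem.Set.add s (PySem.List.pyGetD kv.2 0 0)) (PySem.List.pyGetD kv.2 1 0))
    PySem.Set.empty
  let xs : List Int := PySem.List.sorted xv (fun x => x) false
  (PySem.List.pyRange 0 ((xs.length : Int) - 1) 1).foldl (fun out i =>
    let start := PySem.List.pyGetD xs i 0
    let e := PySem.List.pyGetD xs (i + 1) 0
    out ++ [(start, e, d.items.foldl (fun ks kv =>
      if PySem.List.pyGetD kv.2 0 0 < e ∧ PySem.List.pyGetD kv.2 1 0 > start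
      then ks ++ [kv.1] else ks) [])]) []

-- ===== PORT B =====
-- pos[line[0]] / pos[line[1]] ported as Dict.getD (exact: every endpoint is a key of pos);
-- buckets[i].append(key) ported as pySetD at i with the appended list (exact in-place append).
def overlap_lines_axis_alt (lines : List (Int × List Int)) : List (Int × Int × List Int) :=
  let d : PySem.Dict Int (List Int) := PySem.Dict.ofList lines
  let xs : List Int := PySem.List.sorted
    (PySem.Set.ofList (d.values.flatMap (fun line =>
      [PySem.List.pyGetD line 0 0, PySem.List.pyGetD line 1 0]))) (fun x => x) false
  let pos : PySem.Dict Int Int :=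
    (PySem.List.enumerate xs 0).foldl (fun p ix => p.insert ix.2 ix.1) PySem.Dict.empty
  let buckets0 : List (List Int) := List.replicate (xs.length - 1) []
  let buckets : List (List Int) := d.items.foldl (fun bs kv =>
    (PySem.List.pyRange (pos.getD (PySem.List.pyGetD kv.2 0 0) 0)
                        (pos.getD (PySem.List.pyGetD kv.2 1 0) 0) 1).foldl
      (fun bs i => PySem.List.pySetD bs i (PySem.List.pyGetD bs i [] ++ [kv.1])) bs) buckets0
  (PySem.List.enumerate buckets 0).map (fun iseg =>
    (PySem.List.pyGetD xs iseg.1 0, PySem.List.pyGetD xs (iseg.1 + 1) 0, iseg.2))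

-- ===== PRECONDITION & SPEC =====
-- Pre_ excludes inputs where some line tuple has fewer than two coordinates: there
-- Python A raises IndexError.
def Pre_overlap_lines_axis (lines : List (Int × List Int)) : Prop :=
  ∀ kv ∈ lines, 2 ≤ kv.2.length
instance (lines : List (Int × List Int)) : Decidable (Pre_overlap_lines_axis lines) := by
  unfold Pre_overlap_lines_axis; infer_instance
def pvWitness_overlap_lines_axis : (List (Int × List Int)) := [(0, [0, 2]), (1, [1, 3])]

def Spec_overlap_lines_axis (lines : List (Int × List Int)) (out : List (Int × Int × List Int)) : Prop := out = overlap_lines_axis_alt lines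
instance (lines : List (Int × List Int)) (out : List (Int × Int × List Int)) : Decidable (Spec_overlap_lines_axis lines out) := by unfold Spec_overlap_lines_axis; infer_instance

-- ===== CLAIM (what is proved, stated in full; the proofs are below) =====
def Claim_equal_overlap_lines_axis : Prop := ∀ (lines : List (Int × List Int)), Dom_overlap_lines_axis lines → Pre_overlap_lines_axis lines → Spec_overlap_lines_axis lines (overlap_lines_axis lines)

-- ===== LEMMAS AND PROOFS =====

-- A's endpoint-collecting loop is Set.ofList of the flattened endpoint list
lemma pv_set_fold (l : List (Int × List Int)) (s : PySem.Set Int) :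
    l.foldl (fun s kv => PySem.Set.add (PySem.Set.add s (PySem.List.pyGetD kv.2 0 0))
      (PySem.List.pyGetD kv.2 1 0)) s
      = (l.flatMap (fun kv => [PySem.List.pyGetD kv.2 0 0, PySem.List.pyGetD kv.2 1 0])).foldl
          PySem.Set.add s := by
  induction l generalizing s with
  | nil => rfl
  | cons a t ih => simp [List.foldl, ih]

-- 'if p: out.append(kv.key)' loop as filter+map
lemma pv_foldl_if_append {P : (Int × List Int) → Prop} [DecidablePred P]
    (l : List (Int × List Int)) (acc : List Int) :
    l.foldl (fun ks kv => if P kv then ks ++ [kv.1] else ks) acc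
      = acc ++ (l.filter (fun kv => decide (P kv))).map (·.1) := by
  induction l generalizing acc with
  | nil => simp
  | cons a t ih =>
    simp only [List.foldl_cons, List.filter_cons]
    by_cases h : P a <;> simp [h, ih]

-- strict monotonicity of a strictly increasing list
lemma pv_getElem_lt_iff (xs : List Int) (h : xs.Pairwise (· < ·))
    {p q : Nat} (hp : p < xs.length) (hq : q < xs.length) :
    xs[p] < xs[q] ↔ p < q := by
  have mono : ∀ {a b : Nat} (_ : a < xs.length) (_ : b < xs.length), a < b → xs[a] < xs[b] :=
    fun ha hb hab => List.pairwise_iff_getElem.mp h _ _ ha hb hab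
  constructor
  · intro hlt
    by_contra hc
    rw [Nat.not_lt] at hc
    rcases Nat.eq_or_lt_of_le hc with heq | hlt2
    · subst heq; exact lt_irrefl _ hlt
    · exact absurd (mono hq hp hlt2) (not_lt.mpr (le_of_lt hlt))
  · exact mono hp hq

-- the pos dict looks up the index of an element of a Nodup list
lemma pv_pos_getD (xs : List Int) (h : xs.Nodup) (t : Nat) (ht : t < xs.length) :
    ((PySem.List.enumerate xs 0).foldl (fun p ix => p.insert ix.2 ix.1)
      PySem.Dict.empty).getD xs[t] 0 = (t : Int) := by
  have hnd : (List.map (fun ix : Int × Int => ix.2) (PySem.List.enumerate xs 0)).Nodup := by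
    rw [PySem.List.map_snd_enumerate]; exact h
  have hitems := PySem.Dict.items_foldl_insert_fresh (PySem.List.enumerate xs 0)
    (fun ix => ix.2) (fun ix => ix.1) PySem.Dict.empty
    (fun a _ => PySem.Dict.contains_empty _) hnd
  have hmem : ((xs[t] : Int), (t : Int)) ∈
      ((PySem.List.enumerate xs 0).foldl (fun p ix => p.insert ix.2 ix.1)
        PySem.Dict.empty).items := by
    rw [hitems]
    have : ((0 + (t : Int)), xs[t]) ∈ PySem.List.enumerate xs 0 :=
      (PySem.List.mem_enumerate_iff xs 0 _).mpr ⟨t, ht, rfl⟩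
    simp only [PySem.Dict.empty] at *
    refine List.mem_append.mpr (Or.inr ?_)
    exact List.mem_map.mpr ⟨((0 + (t : Int)), xs[t]), this, by simp⟩
  have hkeys : ((PySem.List.enumerate xs 0).foldl (fun p ix => p.insert ix.2 ix.1)
      PySem.Dict.empty).keys.Nodup := by
    have := PySem.Dict.nodup_keys_foldl_insert_key (PySem.List.enumerate xs 0)
      (fun ix : Int × Int => ix.2) (fun _ ix => ix.1) PySem.Dict.empty (by simp [PySem.Dict.keys, PySem.Dict.empty])
    exact this
  exact PySem.Dict.getD_of_mem_items _ hmem hkeys 0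

-- the inner range-loop preserves the number of buckets
lemma pv_inner_len (k : Int) (rng : List Int) (bs : List (List Int)) :
    (rng.foldl
      (fun bs i => PySem.List.pySetD bs i (PySem.List.pyGetD bs i [] ++ [k])) bs).length
      = bs.length := by
  induction rng generalizing bs with
  | nil => rfl
  | cons a t ih => rw [List.foldl_cons, ih, PySem.List.length_pySetD]

-- the inner range-loop appends k to buckets lo..hi-1
lemma pv_inner_aux (k : Int) : ∀ (n : Nat) (lo hi : Int), n = (hi - lo).toNat → 0 ≤ lo →
    ∀ (bs : List (List Int)), hi ≤ (bs.length : Int) → ∀ (j : Nat),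
    ((PySem.List.pyRange lo hi 1).foldl
      (fun bs i => PySem.List.pySetD bs i (PySem.List.pyGetD bs i [] ++ [k])) bs)[j]?
      = (bs[j]?).map (fun b => b ++ if lo ≤ (j : Int) ∧ (j : Int) < hi then [k] else []) := by
  intro n
  induction n with
  | zero =>
    intro lo hi hn hlo bs hhi j
    rw [PySem.List.pyRange_one_eq_nil (by omega)]
    have hcond : ¬ (lo ≤ (j : Int) ∧ (j : Int) < hi) := by omega
    simp [hcond]
  | succ n ih =>
    intro lo hi hn hlo bs hhi j
    have hlt : lo < hi := by omega
    rw [PySem.List.pyRange_one_cons hlt, List.foldl_cons]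
    have hlen : lo.toNat < bs.length := by omega
    have hbs' : PySem.List.pySetD bs lo (PySem.List.pyGetD bs lo [] ++ [k])
        = bs.set lo.toNat (PySem.List.pyGetD bs lo [] ++ [k]) :=
      PySem.List.pySetD_of_nonneg bs _ hlo
    have ha1 : n = (hi - (lo + 1)).toNat := by omega
    have ha2 : (0:Int) ≤ lo + 1 := by omega
    have ha3 : hi ≤ (((bs.set lo.toNat (PySem.List.pyGetD bs lo [] ++ [k]))).length : Int) := by
      rw [List.length_set]; exact hhi
    rw [hbs', ih (lo + 1) hi ha1 ha2 _ ha3 j]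
    rw [List.getElem?_set]
    by_cases hj : lo.toNat = j
    · have hjlo : (j : Int) = lo := by omega
      have hget : PySem.List.pyGetD bs lo [] = bs[lo.toNat] :=
        PySem.List.pyGetD_eq_getElem bs [] hlo (by omega)
      have h1 : ¬ (lo + 1 ≤ (j : Int) ∧ (j : Int) < hi) := by omega
      have h2 : lo ≤ (j : Int) ∧ (j : Int) < hi := by omega
      subst hj
      rw [if_pos rfl, if_pos hlen, List.getElem?_eq_getElem hlen, hget]
      simp only [Option.map_some, if_neg h1, if_pos h2, List.append_nil]
    · have hne : (j : Int) ≠ lo := by omega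
      rw [if_neg hj]
      refine congrArg (fun f => Option.map f bs[j]?) ?_
      funext b
      have hiff : (lo + 1 ≤ (j : Int) ∧ (j : Int) < hi) ↔ (lo ≤ (j : Int) ∧ (j : Int) < hi) :=
        ⟨fun hx => ⟨by omega, hx.2⟩, fun hx => ⟨by omega, hx.2⟩⟩
      rw [if_congr hiff rfl rfl]

-- the outer loop over the lines fills bucket j with exactly the keys whose range covers j
lemma pv_outer (lo hi : (Int × List Int) → Int) :
    ∀ (items : List (Int × List Int)), (∀ kv ∈ items, 0 ≤ lo kv) →
    ∀ (bs : List (List Int)), (∀ kv ∈ items, hi kv ≤ (bs.length : Int)) → ∀ (j : Nat),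
    (items.foldl (fun bs kv =>
      (PySem.List.pyRange (lo kv) (hi kv) 1).foldl
        (fun bs i => PySem.List.pySetD bs i (PySem.List.pyGetD bs i [] ++ [kv.1])) bs) bs)[j]?
      = (bs[j]?).map (fun b => b ++
          (items.filter (fun kv => decide (lo kv ≤ (j : Int) ∧ (j : Int) < hi kv))).map (·.1)) := by
  intro items
  induction items with
  | nil => intro _ bs _ j; simp
  | cons kv t ih =>
    intro hlo bs hhi j
    rw [List.foldl_cons]
    have hlen : ((PySem.List.pyRange (lo kv) (hi kv) 1).foldl
        (fun bs i => PySem.List.pySetD bs i (PySem.List.pyGetD bs i [] ++ [kv.1])) bs).length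
        = bs.length := pv_inner_len _ _ _
    rw [ih (fun a ha => hlo a (List.mem_cons_of_mem _ ha)) _
      (fun a ha => by rw [hlen]; exact hhi a (List.mem_cons_of_mem _ ha)) j]
    rw [pv_inner_aux kv.1 ((hi kv - lo kv).toNat) (lo kv) (hi kv) rfl
      (hlo kv (List.mem_cons_self)) bs (hhi kv (List.mem_cons_self)) j]
    rw [Option.map_map, List.filter_cons]
    by_cases hc : lo kv ≤ (j : Int) ∧ (j : Int) < hi kv <;>
      (refine congrArg (fun f => Option.map f bs[j]?) ?_
       funext b
       simp [hc])

-- the outer loop preserves the number of buckets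
lemma pv_outer_len (lo hi : (Int × List Int) → Int) (items : List (Int × List Int)) :
    ∀ (bs : List (List Int)),
    (items.foldl (fun bs kv =>
      (PySem.List.pyRange (lo kv) (hi kv) 1).foldl
        (fun bs i => PySem.List.pySetD bs i (PySem.List.pyGetD bs i [] ++ [kv.1])) bs) bs).length
      = bs.length := by
  induction items with
  | nil => intro bs; rfl
  | cons kv t ih => intro bs; rw [List.foldl_cons, ih, pv_inner_len]

-- both programs, abstracted over the shared sorted endpoint list and the pos dict
lemma pv_core (items : List (Int × List Int)) (xs : List Int)
    (hpw : xs.Pairwise (· < ·))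
    (hmem : ∀ kv ∈ items, PySem.List.pyGetD kv.2 0 0 ∈ xs ∧ PySem.List.pyGetD kv.2 1 0 ∈ xs)
    (pos : PySem.Dict Int Int)
    (hpos : ∀ a ∈ xs, pos.getD a 0 = (xs.idxOf a : Int)) :
    (PySem.List.pyRange 0 ((xs.length : Int) - 1) 1).foldl (fun out i =>
      out ++ [(PySem.List.pyGetD xs i 0, PySem.List.pyGetD xs (i + 1) 0,
        items.foldl (fun ks kv =>
          if PySem.List.pyGetD kv.2 0 0 < PySem.List.pyGetD xs (i + 1) 0 ∧
             PySem.List.pyGetD kv.2 1 0 > PySem.List.pyGetD xs i 0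
          then ks ++ [kv.1] else ks) [])]) []
    = (PySem.List.enumerate (items.foldl (fun bs kv =>
        (PySem.List.pyRange (pos.getD (PySem.List.pyGetD kv.2 0 0) 0)
                            (pos.getD (PySem.List.pyGetD kv.2 1 0) 0) 1).foldl
          (fun bs i => PySem.List.pySetD bs i (PySem.List.pyGetD bs i [] ++ [kv.1])) bs)
        (List.replicate (xs.length - 1) [])) 0).map (fun iseg =>
        (PySem.List.pyGetD xs iseg.1 0, PySem.List.pyGetD xs (iseg.1 + 1) 0, iseg.2)) := by
  have hnd : xs.Nodup := hpw.imp (fun h => ne_of_lt h)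
  -- hypotheses of pv_outer for the bucket loop
  have hlo : ∀ kv ∈ items, 0 ≤ pos.getD (PySem.List.pyGetD kv.2 0 0) 0 := by
    intro kv hkv
    rw [hpos _ (hmem kv hkv).1]
    exact Int.natCast_nonneg _
  have hhi : ∀ kv ∈ items, pos.getD (PySem.List.pyGetD kv.2 1 0) 0
      ≤ ((List.replicate (xs.length - 1) ([] : List Int)).length : Int) := by
    intro kv hkv
    rw [hpos _ (hmem kv hkv).2, List.length_replicate]
    have := List.idxOf_lt_length_of_mem (hmem kv hkv).2
    omega
  rw [PySem.List.foldl_append_singleton_eq_map, List.nil_append]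
  have hbl : (items.foldl (fun bs kv =>
        (PySem.List.pyRange (pos.getD (PySem.List.pyGetD kv.2 0 0) 0)
                            (pos.getD (PySem.List.pyGetD kv.2 1 0) 0) 1).foldl
          (fun bs i => PySem.List.pySetD bs i (PySem.List.pyGetD bs i [] ++ [kv.1])) bs)
        (List.replicate (xs.length - 1) ([] : List Int))).length = xs.length - 1 := by
    rw [pv_outer_len (fun kv => pos.getD (PySem.List.pyGetD kv.2 0 0) 0)
      (fun kv => pos.getD (PySem.List.pyGetD kv.2 1 0) 0) items]
    exact List.length_replicate
  apply List.ext_getElem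
  · simp [hbl]
  · intro i h1 h2
    have hi1 : i < xs.length - 1 := by
      simp only [List.length_map, PySem.List.length_pyRange_one] at h1
      omega
    have hi2 : i + 1 < xs.length := by omega
    have hi0 : i < xs.length := by omega
    simp only [List.getElem_map, PySem.List.getElem_pyRange_one, PySem.List.getElem_enumerate]
    -- the two index expressions
    have e0 : ((0 : Int) + (i : Int)) = ((i : Nat) : Int) := by omega
    have eg1 : PySem.List.pyGetD xs ((0 : Int) + (i : Int)) 0 = xs[i] := by
      rw [e0, PySem.List.pyGetD_natCast, List.getD_eq_getElem xs 0 hi0]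
    have eg2 : PySem.List.pyGetD xs ((0 : Int) + (i : Int) + 1) 0 = xs[i + 1] := by
      have : ((0 : Int) + (i : Int) + 1) = (((i + 1 : Nat)) : Int) := by push_cast; ring
      rw [this, PySem.List.pyGetD_natCast, List.getD_eq_getElem xs 0 hi2]
    rw [eg1, eg2]
    simp only [Prod.mk.injEq, true_and]
    -- A's inner loop as a filter
    rw [pv_foldl_if_append
      (P := fun kv => PySem.List.pyGetD kv.2 0 0 < xs[i + 1] ∧ PySem.List.pyGetD kv.2 1 0 > xs[i])
      items []]
    rw [List.nil_append]
    -- B's bucket i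
    have hb := pv_outer (fun kv => pos.getD (PySem.List.pyGetD kv.2 0 0) 0)
      (fun kv => pos.getD (PySem.List.pyGetD kv.2 1 0) 0) items hlo
      (List.replicate (xs.length - 1) []) hhi i
    rw [List.getElem?_replicate, if_pos hi1] at hb
    have hbg := List.getElem?_eq_getElem (l := (items.foldl (fun bs kv =>
        (PySem.List.pyRange (pos.getD (PySem.List.pyGetD kv.2 0 0) 0)
                            (pos.getD (PySem.List.pyGetD kv.2 1 0) 0) 1).foldl
          (fun bs i => PySem.List.pySetD bs i (PySem.List.pyGetD bs i [] ++ [kv.1])) bs)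
        (List.replicate (xs.length - 1) ([] : List Int)))) (i := i) (by rw [hbl]; exact hi1)
    rw [hbg, Option.map_some, Option.some.injEq, List.nil_append] at hb
    rw [hb]
    -- the two filters agree
    apply congrArg
    apply List.filter_congr
    intro kv hkv
    rw [decide_eq_decide]
    obtain ⟨ha, hb'⟩ := hmem kv hkv
    rw [hpos _ ha, hpos _ hb']
    have hta : xs.idxOf (PySem.List.pyGetD kv.2 0 0) < xs.length :=
      List.idxOf_lt_length_of_mem ha
    have htb : xs.idxOf (PySem.List.pyGetD kv.2 1 0) < xs.length :=
      List.idxOf_lt_length_of_mem hb'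
    have hga : xs[xs.idxOf (PySem.List.pyGetD kv.2 0 0)] = PySem.List.pyGetD kv.2 0 0 :=
      List.getElem_idxOf hta
    have hgb : xs[xs.idxOf (PySem.List.pyGetD kv.2 1 0)] = PySem.List.pyGetD kv.2 1 0 :=
      List.getElem_idxOf htb
    have hlt1 : PySem.List.pyGetD kv.2 0 0 < xs[i + 1]
        ↔ xs.idxOf (PySem.List.pyGetD kv.2 0 0) < i + 1 := by
      conv_lhs => rw [← hga]
      exact pv_getElem_lt_iff xs hpw hta hi2
    have hlt2 : xs[i] < PySem.List.pyGetD kv.2 1 0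
        ↔ i < xs.idxOf (PySem.List.pyGetD kv.2 1 0) := by
      conv_lhs => rw [← hgb]
      exact pv_getElem_lt_iff xs hpw hi0 htb
    rw [gt_iff_lt, hlt1, hlt2]
    omega

lemma pv_main (lines : List (Int × List Int)) :
    overlap_lines_axis lines = overlap_lines_axis_alt lines := by
  simp only [overlap_lines_axis, overlap_lines_axis_alt]
  have hset : ((PySem.Dict.ofList lines).items.foldl (fun s kv =>
        PySem.Set.add (PySem.Set.add s (PySem.List.pyGetD kv.2 0 0))
          (PySem.List.pyGetD kv.2 1 0)) PySem.Set.empty)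
      = PySem.Set.ofList ((PySem.Dict.ofList lines).values.flatMap (fun line =>
          [PySem.List.pyGetD line 0 0, PySem.List.pyGetD line 1 0])) := by
    rw [pv_set_fold, PySem.Set.ofList_eq_foldl]
    congr 1
    show _ = ((PySem.Dict.ofList lines).items.map (fun kv => kv.2)).flatMap
      (fun line => [PySem.List.pyGetD line 0 0, PySem.List.pyGetD line 1 0])
    rw [List.flatMap_map]
  rw [← hset]
  have hxv : ((PySem.Dict.ofList lines).items.foldl (fun s kv =>
        PySem.Set.add (PySem.Set.add s (PySem.List.pyGetD kv.2 0 0))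
          (PySem.List.pyGetD kv.2 1 0)) PySem.Set.empty)
      = PySem.Set.ofList ((PySem.Dict.ofList lines).items.flatMap (fun kv =>
          [PySem.List.pyGetD kv.2 0 0, PySem.List.pyGetD kv.2 1 0])) := by
    rw [pv_set_fold]
    exact (PySem.Set.ofList_eq_foldl _).symm
  have hpw : (PySem.List.sorted ((PySem.Dict.ofList lines).items.foldl (fun s kv =>
        PySem.Set.add (PySem.Set.add s (PySem.List.pyGetD kv.2 0 0))
          (PySem.List.pyGetD kv.2 1 0)) PySem.Set.empty) (fun x => x) false).Pairwise (· < ·) := by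
    rw [hxv]
    exact PySem.List.sorted_ofList_pairwise_lt _
  have hnd : (PySem.List.sorted ((PySem.Dict.ofList lines).items.foldl (fun s kv =>
        PySem.Set.add (PySem.Set.add s (PySem.List.pyGetD kv.2 0 0))
          (PySem.List.pyGetD kv.2 1 0)) PySem.Set.empty) (fun x => x) false).Nodup :=
    hpw.imp (fun h => ne_of_lt h)
  apply pv_core _ _ hpw
  · intro kv hkv
    constructor <;>
      (rw [PySem.List.mem_sorted, hxv, PySem.Set.mem_ofList]
       exact List.mem_flatMap.mpr ⟨kv, hkv, by simp⟩)
  · intro a ha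
    have h1 := List.idxOf_lt_length_of_mem ha
    have h2 := pv_pos_getD _ hnd _ h1
    rwa [List.getElem_idxOf h1] at h2

-- ===== VERDICT (by name: the statement is the Claim_ definition above) =====
theorem overlap_lines_axis_spec : Claim_equal_overlap_lines_axis := by
  intro lines _ _
  unfold Spec_overlap_lines_axis
  exact pv_main lines
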